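-- pv_equiv track=rewrite | github.com/Ahhgust/snp2id | bin/samStats.py | countAlignedBases
-- ===== SOURCE A (Python) =====
-- def countAlignedBases(cigar):
--     '''
--     This takes in a cigar string and counts the number of aligned bases
--     Taken as the number of Ms and Is
--     '''
--
--     nchar = len(cigar)
--     num=0
--     mtag=0
--
--     for i in range(nchar):
--         if cigar[i] >= '0' and cigar[i] <= '9':
--             num *= 10
--             num += int(cigar[i])
--         elif cigar[i] == 'M' or cigar[i]=='I':
--             mtag += num
--             num=0
--         else:
--             num=0
--
--     return mtag
-- ===== SOURCE B (Python) =====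
-- def countAlignedBases(cigar):
--     '''Tokenize the CIGAR into maximal digit runs and sum those immediately
--     followed by an M or I operator (A uses no imports, so no re module).'''
--     total = 0
--     i = 0
--     n = len(cigar)
--     while i < n:
--         if '0' <= cigar[i] <= '9':
--             j = i
--             while j < n and '0' <= cigar[j] <= '9':
--                 j += 1
--             if j < n and cigar[j] in 'MI':
--                 total += int(cigar[i:j])
--             i = j
--         else:
--             i += 1
--     return total
-- ===== Notes on version B (the rewrite author's own statement) =====
-- stated objective: alternative
-- what changed: Replaced A's per-character accumulate-and-reset state machine (carrying a running num across iterations) with a tokenize-first scan: find each maximal digit run, convert it with int() only when it is immediately followed by M or I, and sum those token values.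
import Mathlib
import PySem

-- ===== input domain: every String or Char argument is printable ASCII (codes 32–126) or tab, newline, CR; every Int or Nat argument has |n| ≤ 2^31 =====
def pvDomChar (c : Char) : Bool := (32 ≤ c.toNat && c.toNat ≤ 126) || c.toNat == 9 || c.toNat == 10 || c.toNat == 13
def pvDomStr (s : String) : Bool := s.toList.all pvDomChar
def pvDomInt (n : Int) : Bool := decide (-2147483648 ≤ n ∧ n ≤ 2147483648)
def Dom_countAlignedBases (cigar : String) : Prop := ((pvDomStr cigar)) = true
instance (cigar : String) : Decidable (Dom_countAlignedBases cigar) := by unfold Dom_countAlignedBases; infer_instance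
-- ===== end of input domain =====

-- B rewrites A's accumulate-and-reset character state machine as a tokenize-first scan
-- (maximal digit runs, converted and summed only when followed by M/I); same value, same cost.

-- ===== PORT A =====
-- A's for-loop over the characters, carrying (num, mtag); int(cigar[i]) on a single
-- digit character is ported exactly as its code-point value minus 48.
def pvAGo : List Char → Int → Int → Int
  | [], _, mtag => mtag
  | c :: rest, num, mtag =>
    if '0' ≤ c && c ≤ '9' then pvAGo rest (num * 10 + ((c.toNat : Int) - 48)) mtag
    else if c = 'M' || c = 'I' then pvAGo rest 0 (mtag + num)
    else pvAGo rest 0 mtag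

def countAlignedBases (cigar : String) : Int := pvAGo cigar.toList 0 0

-- ===== PORT B =====
def pvIsDig (c : Char) : Bool := '0' ≤ c && c ≤ '9'

-- int(cigar[i:j]) on a nonempty run of ASCII digits: exact on that domain.
def pvDigVal (acc : Int) (ds : List Char) : Int :=
  ds.foldl (fun a c => a * 10 + ((c.toNat : Int) - 48)) acc

-- Source B's outer while loop; its inner `while j < n and digit` run scan is
-- takeWhile/dropWhile of the digit predicate.
def pvBGo : List Char → Int
  | [] => 0
  | c :: rest =>
    if h : pvIsDig c = true then
      (match List.dropWhile pvIsDig (c :: rest) with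
       | op :: _ => if op = 'M' || op = 'I' then pvDigVal 0 (List.takeWhile pvIsDig (c :: rest)) else 0
       | [] => 0) + pvBGo (List.dropWhile pvIsDig (c :: rest))
    else pvBGo rest
termination_by l => l.length
decreasing_by
  · simp only [List.dropWhile_cons, h, if_true, List.length_cons]
    exact Nat.lt_succ_of_le (List.length_dropWhile_le _ _)
  · simp

def countAlignedBases_alt (cigar : String) : Int := pvBGo cigar.toList

-- ===== PRECONDITION & SPEC =====
def Spec_countAlignedBases (cigar : String) (out : Int) : Prop := out = countAlignedBases_alt cigar
instance (cigar : String) (out : Int) : Decidable (Spec_countAlignedBases cigar out) := by unfold Spec_countAlignedBases; infer_instance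

-- ===== CLAIM (what is proved, stated in full; the proofs are below) =====
def Claim_equal_countAlignedBases : Prop := ∀ (cigar : String), Dom_countAlignedBases cigar → Spec_countAlignedBases cigar (countAlignedBases cigar)

-- ===== LEMMAS AND PROOFS =====

theorem pvAGo_mtag (l : List Char) : ∀ num m, pvAGo l num m = m + pvAGo l num 0 := by
  induction l with
  | nil => intro num m; simp [pvAGo]
  | cons c rest ih =>
    intro num m
    simp only [pvAGo]
    by_cases h : ('0' ≤ c && c ≤ '9') = true
    · rw [if_pos h, if_pos h]; exact ih _ m
    · rw [if_neg h, if_neg h]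
      by_cases h2 : (c = 'M' || c = 'I') = true
      · rw [if_pos h2, if_pos h2, ih 0 (m + num), ih 0 (0 + num)]; ring
      · rw [if_neg h2, if_neg h2, ih 0 m]

theorem pvAGo_run (ds : List Char) (hds : ∀ c ∈ ds, pvIsDig c = true) :
    ∀ t num, pvAGo (ds ++ t) num 0 = pvAGo t (pvDigVal num ds) 0 := by
  induction ds with
  | nil => intro t num; simp [pvDigVal]
  | cons c ds ih =>
    intro t num
    have hc : pvIsDig c = true := hds c (by simp)
    simp only [List.cons_append, pvAGo, pvIsDig] at hc ⊢
    rw [if_pos hc, ih (fun x hx => hds x (by simp [hx])) t]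
    simp [pvDigVal]

theorem pvBGo_eq : ∀ n (l : List Char), l.length ≤ n → pvBGo l = pvAGo l 0 0 := by
  intro n
  induction n with
  | zero =>
    intro l hl
    have : l = [] := List.eq_nil_of_length_eq_zero (Nat.le_zero.mp hl)
    simp [this, pvBGo, pvAGo]
  | succ n ih =>
    intro l hl
    match l with
    | [] => simp [pvBGo, pvAGo]
    | c :: rest =>
      by_cases h : pvIsDig c = true
      · -- digit run case
        have hsplit := List.takeWhile_append_dropWhile (p := pvIsDig) (l := c :: rest)
        have hrun : ∀ x ∈ List.takeWhile pvIsDig (c :: rest), pvIsDig x = true :=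
          fun x hx => List.mem_takeWhile_imp hx
        have hA : pvAGo (c :: rest) 0 0 =
            pvAGo (List.dropWhile pvIsDig (c :: rest)) (pvDigVal 0 (List.takeWhile pvIsDig (c :: rest))) 0 := by
          conv_lhs => rw [← hsplit]
          exact pvAGo_run _ hrun _ 0
        have hlen := congrArg List.length hsplit
        rw [List.length_append] at hlen
        simp only [List.length_cons] at hlen
        have hne : (List.takeWhile pvIsDig (c :: rest)) ≠ [] := by
          simp [h]
        rw [pvBGo, dif_pos h]
        match hrest : List.dropWhile pvIsDig (c :: rest) with
        | [] =>
          rw [hrest] at hA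
          rw [hA]
          simp [pvBGo, pvAGo]
        | op :: t =>
          have hop : pvIsDig op = false := by
            have := List.head?_dropWhile_not pvIsDig (c :: rest)
            rw [hrest] at this; simpa using this
          have ht : t.length ≤ n := by
            have h1 : 1 ≤ (List.takeWhile pvIsDig (c :: rest)).length :=
              Nat.one_le_iff_ne_zero.mpr (by simpa [List.length_eq_zero_iff] using hne)
            rw [hrest] at hlen
            simp only [List.length_cons] at hlen hl
            omega
          rw [hrest] at hA
          rw [hA]
          have hbop : pvBGo (op :: t) = pvAGo t 0 0 := by
            rw [pvBGo, dif_neg (by simp [hop]), ih t ht]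
          have hop' : ¬ (('0' ≤ op && op ≤ '9') = true) := by
            unfold pvIsDig at hop; simp [hop]
          by_cases hMI : (op = 'M' || op = 'I') = true
          · have h1 : pvAGo (op :: t) (pvDigVal 0 (List.takeWhile pvIsDig (c :: rest))) 0 =
                pvDigVal 0 (List.takeWhile pvIsDig (c :: rest)) + pvAGo t 0 0 := by
              rw [pvAGo, if_neg hop', if_pos hMI, pvAGo_mtag t 0]; ring
            rw [h1]; simp [hMI, hbop]
          · have h1 : pvAGo (op :: t) (pvDigVal 0 (List.takeWhile pvIsDig (c :: rest))) 0 =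
                pvAGo t 0 0 := by
              rw [pvAGo, if_neg hop', if_neg hMI]
            rw [h1]; simp [hMI, hbop]
      · rw [pvBGo, dif_neg h]
        have h' : ¬ (('0' ≤ c && c ≤ '9') = true) := by
          simpa [pvIsDig] using h
        rw [pvAGo, if_neg h']
        have hr : rest.length ≤ n := by simpa using Nat.lt_succ_iff.mp (by simpa using hl)
        by_cases hMI : (c = 'M' || c = 'I') = true
        · rw [if_pos hMI, ih rest hr, pvAGo_mtag rest 0]; simp
        · rw [if_neg hMI, ih rest hr]

-- ===== VERDICT (by name: the statement is the Claim_ definition above) =====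
theorem countAlignedBases_spec : Claim_equal_countAlignedBases := by
  intro cigar _
  unfold Spec_countAlignedBases countAlignedBases countAlignedBases_alt
  exact (pvBGo_eq cigar.toList.length cigar.toList le_rfl).symm
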